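-- pv_equiv track=rewrite | github.com/Harshilbhardwaj47/Compititative-programing | Rakshit/Question3.py | three_digits
-- ===== SOURCE A (Python) =====
-- def three_digits(a,b,c):
--     if a>=b:
--         return ((a-b)//2 + (a-b)%2)
--     if b%c==0:
--         return (1+three_digits(a,b//c,c))
--     else:
--         x=(b//c+1)*c
--         return ((x-b)//2+(x-b)%2+three_digits(a,x,c))
-- ===== SOURCE B (Python) =====
-- def three_digits(a, b, c):
--     total = 0
--     while a < b:
--         if b % c == 0:
--             total += 1
--             b //= c
--         else:
--             x = (b // c + 1) * c
--             total += (x - b) // 2 + (x - b) % 2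
--             b = x
--     return total + (a - b) // 2 + (a - b) % 2
-- ===== Notes on version B (the rewrite author's own statement) =====
-- stated objective: alternative
-- what changed: Replaces A's recursion (which adds each step's contribution while unwinding the call stack) by a single iterative while-loop that accumulates the same contributions in a running total and adds the closing term after the loop.
-- outside the precondition, e.g. on three_digits(-1, 5, -2): A returns 2, B returns 2
import Mathlib
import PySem

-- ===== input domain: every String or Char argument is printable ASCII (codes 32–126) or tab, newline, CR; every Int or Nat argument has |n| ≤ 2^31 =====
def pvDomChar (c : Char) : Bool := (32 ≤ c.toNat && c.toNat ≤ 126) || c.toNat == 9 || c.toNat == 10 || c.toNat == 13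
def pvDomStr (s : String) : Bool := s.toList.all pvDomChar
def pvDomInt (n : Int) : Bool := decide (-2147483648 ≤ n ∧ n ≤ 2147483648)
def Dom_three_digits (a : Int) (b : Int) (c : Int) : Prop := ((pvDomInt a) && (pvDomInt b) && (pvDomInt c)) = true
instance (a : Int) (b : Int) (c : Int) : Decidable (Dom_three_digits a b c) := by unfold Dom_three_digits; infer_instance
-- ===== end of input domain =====

-- B replaces A's recursion (summing on the way back up) by a single iterative loop with an
-- accumulator; objective: alternative decomposition (iterative, no recursion depth).

-- ===== PORT A =====
-- A's recursion, literal step for step; the fuel argument is only a totality guard and is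
-- ample on every input on which the Python A terminates (each step shrinks b-a within two calls).
def threeDigitsRec (fuel : Nat) (a : Int) (b : Int) (c : Int) : Int :=
  match fuel with
  | 0 => 0
  | fuel + 1 =>
    if a ≥ b then
      PySem.Int.floordiv (a - b) 2 + PySem.Int.mod (a - b) 2
    else if PySem.Int.mod b c = 0 then
      1 + threeDigitsRec fuel a (PySem.Int.floordiv b c) c
    else
      let x := (PySem.Int.floordiv b c + 1) * c
      PySem.Int.floordiv (x - b) 2 + PySem.Int.mod (x - b) 2 + threeDigitsRec fuel a x c

def three_digits (a : Int) (b : Int) (c : Int) : Int :=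
  threeDigitsRec (2 * (b - a).toNat + 8) a b c

-- ===== PORT B =====
-- B's while-loop with accumulator `total`; same fuel guard for totality.
def threeDigitsLoop (fuel : Nat) (a : Int) (b : Int) (c : Int) (total : Int) : Int :=
  match fuel with
  | 0 => total
  | fuel + 1 =>
    if a < b then
      if PySem.Int.mod b c = 0 then
        threeDigitsLoop fuel a (PySem.Int.floordiv b c) c (total + 1)
      else
        let x := (PySem.Int.floordiv b c + 1) * c
        threeDigitsLoop fuel a x c
          (total + (PySem.Int.floordiv (x - b) 2 + PySem.Int.mod (x - b) 2))
    else
      total + PySem.Int.floordiv (a - b) 2 + PySem.Int.mod (a - b) 2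

def three_digits_alt (a : Int) (b : Int) (c : Int) : Int :=
  threeDigitsLoop (2 * (b - a).toNat + 8) a b c 0

-- ===== PRECONDITION & SPEC =====
-- Pre_ excludes inputs with a < b and (a < 1 or |c| < 2): there A in general recurses forever
-- (RecursionError; ZeroDivisionError for c = 0); on a few such inputs with negative c A happens
-- to return, and B returns the same value there.
def Pre_three_digits (a : Int) (b : Int) (c : Int) : Prop := a ≥ b ∨ (1 ≤ a ∧ (2 ≤ c ∨ c ≤ -2))
instance (a : Int) (b : Int) (c : Int) : Decidable (Pre_three_digits a b c) := by
  unfold Pre_three_digits; infer_instance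

def pvWitness_three_digits : Int × Int × Int := (1, 10, 2)

def Spec_three_digits (a : Int) (b : Int) (c : Int) (out : Int) : Prop := out = three_digits_alt a b c
instance (a : Int) (b : Int) (c : Int) (out : Int) : Decidable (Spec_three_digits a b c out) := by
  unfold Spec_three_digits; infer_instance

-- ===== CLAIM (what is proved, stated in full; the proofs are below) =====
def Claim_equal_three_digits : Prop := ∀ (a : Int) (b : Int) (c : Int), Dom_three_digits a b c → Pre_three_digits a b c → Spec_three_digits a b c (three_digits a b c)

-- ===== LEMMAS AND PROOFS =====

-- The loop with accumulator `total` computes `total +` the recursion's value (same fuel).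
theorem loop_eq_rec (fuel : Nat) : ∀ (a b c total : Int),
    threeDigitsLoop fuel a b c total = total + threeDigitsRec fuel a b c := by
  induction fuel with
  | zero => intro a b c total; simp [threeDigitsLoop, threeDigitsRec]
  | succ fuel ih =>
    intro a b c total
    by_cases hab : a < b
    · by_cases hm : PySem.Int.mod b c = 0
      · simp only [threeDigitsLoop, threeDigitsRec, if_pos hab, if_neg (not_le.mpr hab),
          if_pos hm, ih]
        ring
      · simp only [threeDigitsLoop, threeDigitsRec, if_pos hab, if_neg (not_le.mpr hab),
          if_neg hm, ih]
        ring
    · simp only [threeDigitsLoop, threeDigitsRec, if_neg hab, if_pos (not_lt.mp hab)]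
      ring

-- ===== VERDICT (by name: the statement is the Claim_ definition above) =====
theorem three_digits_spec : Claim_equal_three_digits := by
  intro a b c _ _
  unfold Spec_three_digits three_digits three_digits_alt
  rw [loop_eq_rec]
  ring
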